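-- pv_equiv track=rewrite | github.com/supriya-sharma/NIH-RoadMap | get_urls.py | filter_by_filetypes
-- ===== SOURCE A (Python) =====
-- def filter_by_filetypes(links, valid_filetypes=['bed', 'wig', 'sra']):
--     for filetype in valid_filetypes:
--         type_links = []
--         for link in links:
--             if link.endswith(filetype + '.gz'):
--                 type_links.append(link)
--         if type_links:
--             return type_links
--     return []
-- ===== SOURCE B (Python) =====
-- def filter_by_filetypes(links, valid_filetypes=['bed', 'wig', 'sra']):
--     # One grouping pass: index links by every filetype suffix they match,
--     # then return the first filetype's group (in priority order) that is nonempty.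
--     groups = {ft: [] for ft in valid_filetypes}
--     for link in links:
--         for ft in groups:
--             if link.endswith(ft + '.gz'):
--                 groups[ft].append(link)
--     for ft in valid_filetypes:
--         if groups[ft]:
--             return groups[ft]
--     return []
-- ===== Notes on version B (the rewrite author's own statement) =====
-- stated objective: alternative
-- what changed: Instead of A's filetype-outer loop that rescans all links per filetype and returns early, B makes one grouping pass over links building a dict from each filetype to its matching links (a link goes into every group whose suffix it matches), then a selection pass returns the first filetype's nonempty group.
import Mathlib
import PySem

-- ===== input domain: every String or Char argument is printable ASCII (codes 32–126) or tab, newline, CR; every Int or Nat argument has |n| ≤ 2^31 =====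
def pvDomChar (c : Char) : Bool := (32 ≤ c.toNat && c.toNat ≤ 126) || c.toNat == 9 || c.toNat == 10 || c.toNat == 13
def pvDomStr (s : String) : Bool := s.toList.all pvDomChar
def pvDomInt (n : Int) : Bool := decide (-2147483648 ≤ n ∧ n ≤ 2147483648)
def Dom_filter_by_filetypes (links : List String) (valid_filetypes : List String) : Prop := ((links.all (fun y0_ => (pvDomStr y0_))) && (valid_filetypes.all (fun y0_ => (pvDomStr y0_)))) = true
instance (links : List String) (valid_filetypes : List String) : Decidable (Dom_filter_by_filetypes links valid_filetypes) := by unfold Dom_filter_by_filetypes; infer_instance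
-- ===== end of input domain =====

-- B replaces A's outer filetype scan with repeated inner link scans by one grouping
-- pass over links building a dict filetype -> matching links, then a selection pass
-- over the filetypes (objective: alternative decomposition, same cost).

-- ===== PORT A =====
-- outer 'for filetype in valid_filetypes' loop of A, with early return
def aLoop (links : List String) : List String → List String
  | [] => []
  | ft :: rest =>
    let type_links := links.foldl
      (fun acc link => if PySem.Str.endswith link (ft ++ ".gz") then acc ++ [link] else acc) []
    if type_links = [] then aLoop links rest else type_links

def filter_by_filetypes (links : List String) (valid_filetypes : List String) : List String :=
  aLoop links valid_filetypes

-- ===== PORT B =====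
-- B's dict comprehension {ft: [] for ft in valid_filetypes}
def bGroups0 (vft : List String) : PySem.Dict String (List String) :=
  vft.foldl (fun d ft => d.insert ft []) PySem.Dict.empty

-- inner 'for ft in groups' loop of B (iterates the dict's keys)
def bInner (link : String) (ks : List String) (d : PySem.Dict String (List String)) :
    PySem.Dict String (List String) :=
  ks.foldl (fun d2 ft =>
    if PySem.Str.endswith link (ft ++ ".gz") then d2.modify ft [] (· ++ [link]) else d2) d

-- body of B's 'for link in links' grouping loop
def bStep (d : PySem.Dict String (List String)) (link : String) :
    PySem.Dict String (List String) :=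
  bInner link d.keys d

-- B's final selection loop over valid_filetypes
def bSelect (groups : PySem.Dict String (List String)) : List String → List String
  | [] => []
  | ft :: rest => if groups.getD ft [] = [] then bSelect groups rest else groups.getD ft []

def filter_by_filetypes_alt (links : List String) (valid_filetypes : List String) : List String :=
  bSelect (links.foldl bStep (bGroups0 valid_filetypes)) valid_filetypes

-- ===== PRECONDITION & SPEC =====
def Spec_filter_by_filetypes (links : List String) (valid_filetypes : List String) (out : List String) : Prop := out = filter_by_filetypes_alt links valid_filetypes
instance (links : List String) (valid_filetypes : List String) (out : List String) : Decidable (Spec_filter_by_filetypes links valid_filetypes out) := by unfold Spec_filter_by_filetypes; infer_instance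

-- ===== CLAIM (what is proved, stated in full; the proofs are below) =====
def Claim_equal_filter_by_filetypes : Prop := ∀ (links : List String) (valid_filetypes : List String), Dom_filter_by_filetypes links valid_filetypes → Spec_filter_by_filetypes links valid_filetypes (filter_by_filetypes links valid_filetypes)

-- ===== LEMMAS AND PROOFS =====

theorem bInner_cons (link k : String) (ks : List String)
    (d : PySem.Dict String (List String)) :
    bInner link (k :: ks) d
      = bInner link ks
          (if PySem.Str.endswith link (k ++ ".gz") then d.modify k [] (· ++ [link]) else d) := by
  by_cases hc : PySem.Str.endswith link (k ++ ".gz") <;> simp [bInner]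

-- the inner key loop never changes the key set (it only visits existing keys)
theorem keys_bInner (link : String) (ks : List String)
    (d : PySem.Dict String (List String)) (hks : ∀ k ∈ ks, k ∈ d.keys) :
    (bInner link ks d).keys = d.keys := by
  induction ks generalizing d with
  | nil => rfl
  | cons k ks ih =>
    rw [bInner_cons]
    have hkd : k ∈ d.keys := hks k (List.mem_cons_self ..)
    have hkeys : (if PySem.Str.endswith link (k ++ ".gz") then
        d.modify k [] (· ++ [link]) else d).keys = d.keys := by
      split_ifs
      · rw [PySem.Dict.keys_modify,
          PySem.Dict.keys_insert_of_contains _ _ ((PySem.Dict.contains_iff_mem_keys d k).mpr hkd)]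
      · rfl
    rw [ih _ (fun x hx => hkeys ▸ hks x (List.mem_cons_of_mem _ hx)), hkeys]

-- the inner loop does not touch a key it does not visit
theorem getD_bInner_not_mem (link ft : String) (ks : List String)
    (d : PySem.Dict String (List String)) (h : ft ∉ ks) :
    (bInner link ks d).getD ft [] = d.getD ft [] := by
  induction ks generalizing d with
  | nil => rfl
  | cons k ks ih =>
    simp only [List.mem_cons, not_or] at h
    rw [bInner_cons, ih _ h.2]
    split_ifs
    · rw [PySem.Dict.getD_modify]; simp [h.1]
    · rfl

-- the inner loop appends link to exactly the groups of the matching visited keys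
theorem getD_bInner_mem (link ft : String) (ks : List String)
    (d : PySem.Dict String (List String)) (hnd : ks.Nodup) (hm : ft ∈ ks) :
    (bInner link ks d).getD ft []
      = d.getD ft [] ++ (if PySem.Str.endswith link (ft ++ ".gz") then [link] else []) := by
  induction ks generalizing d with
  | nil => cases hm
  | cons k ks ih =>
    rcases List.nodup_cons.mp hnd with ⟨hk, hnd2⟩
    rw [bInner_cons]
    by_cases he : k = ft
    · subst he
      rw [getD_bInner_not_mem _ _ _ _ hk]
      split_ifs with hc
      · rw [PySem.Dict.getD_modify]; simp
      · simp
    · have hm2 : ft ∈ ks := by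
        rcases List.mem_cons.mp hm with h | h
        · exact absurd h.symm he
        · exact h
      rw [ih _ hnd2 hm2]
      have hft : ¬ft = k := fun h => he h.symm
      split_ifs <;> simp [PySem.Dict.getD_modify, hft]

-- the grouping loop over links: each visited key's group accumulates the filter
theorem getD_foldl_bStep (links : List String) (ft : String)
    (d : PySem.Dict String (List String)) (hnd : d.keys.Nodup) (hm : ft ∈ d.keys) :
    (links.foldl bStep d).getD ft []
      = d.getD ft [] ++ links.filter (fun l => PySem.Str.endswith l (ft ++ ".gz")) := by
  induction links generalizing d with
  | nil => simp
  | cons l ls ih =>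
    have hkeys : (bStep d l).keys = d.keys := keys_bInner l d.keys d (fun _ h => h)
    rw [List.foldl_cons, ih (bStep d l) (hkeys ▸ hnd) (hkeys ▸ hm)]
    simp only [bStep]
    rw [getD_bInner_mem l ft d.keys d hnd hm, List.append_assoc]
    simp only [List.filter_cons]
    split_ifs <;> simp_all

-- the initial dict maps every listed filetype to []
theorem getD_groups0 (vft : List String) (ft : String)
    (d : PySem.Dict String (List String)) :
    (vft.foldl (fun d ft => d.insert ft []) d).getD ft []
      = if ft ∈ vft then [] else d.getD ft [] := by
  induction vft generalizing d with
  | nil => simp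
  | cons v vs ih =>
    rw [List.foldl_cons, ih]
    by_cases hv : ft ∈ vs
    · simp [hv]
    · by_cases he : ft = v
      · subst he; simp [hv, PySem.Dict.getD_insert_self]
      · simp [hv, he, PySem.Dict.getD_insert_of_ne _ _ _ he]

-- every listed filetype is a key of the initial dict
theorem mem_keys_groups0 (vft : List String) (ft : String)
    (d : PySem.Dict String (List String)) (h : ft ∈ vft ∨ ft ∈ d.keys) :
    ft ∈ (vft.foldl (fun d ft => d.insert ft []) d).keys := by
  induction vft generalizing d with
  | nil => simpa using h
  | cons v vs ih =>
    rw [List.foldl_cons]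
    apply ih
    rcases h with h | h
    · rcases List.mem_cons.mp h with h | h
      · right; rw [PySem.Dict.mem_keys_insert]; exact Or.inl h
      · exact Or.inl h
    · right; rw [PySem.Dict.mem_keys_insert]; exact Or.inr h

-- both selection loops agree once each group equals A's filtered list
theorem select_eq (links : List String) (groups : PySem.Dict String (List String))
    (sub : List String)
    (h : ∀ ft ∈ sub, groups.getD ft [] = links.filter (fun l => PySem.Str.endswith l (ft ++ ".gz"))) :
    aLoop links sub = bSelect groups sub := by
  induction sub with
  | nil => rfl
  | cons ft rest ih =>
    have hft := h ft (List.mem_cons_self ..)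
    simp only [aLoop, bSelect, hft, PySem.List.foldl_append_ite_eq_filter,
      List.nil_append, Bool.decide_eq_true]
    split_ifs with hc
    · exact ih (fun g hg => h g (List.mem_cons_of_mem _ hg))
    · rfl

-- ===== VERDICT (by name: the statement is the Claim_ definition above) =====
theorem filter_by_filetypes_spec : Claim_equal_filter_by_filetypes := by
  intro links vft _
  unfold Spec_filter_by_filetypes filter_by_filetypes filter_by_filetypes_alt
  apply select_eq
  intro ft hft
  have hnd : (bGroups0 vft).keys.Nodup :=
    PySem.Dict.nodup_keys_foldl_insert vft (fun _ _ => ([] : List String)) PySem.Dict.empty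
      PySem.Dict.nodup_keys_empty
  have hm : ft ∈ (bGroups0 vft).keys := mem_keys_groups0 vft ft PySem.Dict.empty (Or.inl hft)
  rw [getD_foldl_bStep links ft _ hnd hm]
  show (vft.foldl (fun d ft => d.insert ft []) PySem.Dict.empty).getD ft [] ++ _ = _
  rw [getD_groups0]
  simp [hft]
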